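-- pv_equiv track=rewrite | github.com/folenta/Diplomovka | principleLines.py | findFirstAndLastBlockRow
-- ===== SOURCE A (Python) =====
-- def findFirstAndLastBlockRow(blocks, colCandidate):
--     firstFound = False
--     firstBlockRow = 0
--     lastBlockRow = 0
--
--     for row in blocks:
--         if blocks[row][colCandidate]["background"] == 0:
--             if not firstFound:
--                 firstBlockRow = row
--                 firstFound = True
--             lastBlockRow = row
--
--     return firstBlockRow, lastBlockRow
-- ===== SOURCE B (Python) =====
-- def findFirstAndLastBlockRow(blocks, colCandidate):
--     firstBlockRow = next((row for row in blocks
--                           if blocks[row][colCandidate]["background"] == 0), 0)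
--     lastBlockRow = next((row for row in reversed(blocks)
--                          if blocks[row][colCandidate]["background"] == 0), 0)
--     return firstBlockRow, lastBlockRow
-- ===== Notes on version B (the rewrite author's own statement) =====
-- stated objective: alternative
-- what changed: B performs two independent short-circuiting searches - the first qualifying row scanning forward and the first qualifying row scanning the dict in reverse - instead of A's single flagged pass maintaining first/last mutable state.
import Mathlib
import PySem

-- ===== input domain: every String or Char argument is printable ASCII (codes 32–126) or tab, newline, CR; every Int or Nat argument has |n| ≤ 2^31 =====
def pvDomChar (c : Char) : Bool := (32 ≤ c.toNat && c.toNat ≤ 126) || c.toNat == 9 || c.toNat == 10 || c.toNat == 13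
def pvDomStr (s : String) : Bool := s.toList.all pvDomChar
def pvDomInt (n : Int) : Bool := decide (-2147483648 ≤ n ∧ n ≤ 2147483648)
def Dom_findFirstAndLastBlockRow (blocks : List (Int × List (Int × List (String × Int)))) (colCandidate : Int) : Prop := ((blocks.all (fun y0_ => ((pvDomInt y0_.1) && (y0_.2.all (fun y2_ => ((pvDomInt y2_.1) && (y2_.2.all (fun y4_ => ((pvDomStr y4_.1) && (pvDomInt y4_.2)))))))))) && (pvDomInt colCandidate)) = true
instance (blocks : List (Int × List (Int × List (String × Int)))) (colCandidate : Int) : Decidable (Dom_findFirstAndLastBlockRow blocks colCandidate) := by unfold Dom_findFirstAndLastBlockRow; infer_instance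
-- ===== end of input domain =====

-- B replaces A's single flagged pass by two independent short-circuiting searches
-- (first match forward, first match over the reversed key order); objective: alternative.


-- blocks[row][colCandidate]["background"] as a Python dict chain: none exactly where Python raises KeyError
def pvBg (blocks : List (Int × List (Int × List (String × Int)))) (colCandidate : Int) (row : Int) : Option Int :=
  ((PySem.Dict.ofList ((PySem.Dict.ofList blocks).getD row [])).get? colCandidate).bind
    (fun inner => (PySem.Dict.ofList inner).get? "background")

-- ===== PORT A =====
def findFirstAndLastBlockRow (blocks : List (Int × List (Int × List (String × Int)))) (colCandidate : Int) : Int × Int :=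
  let st := (PySem.Dict.ofList blocks).keys.foldl
    (fun (st : Bool × Int × Int) row =>
      if pvBg blocks colCandidate row = some 0 then
        (true, (if st.1 then st.2.1 else row), row)
      else st)
    (false, 0, 0)
  (st.2.1, st.2.2)

-- ===== PORT B =====
-- next((row for row in blocks if …), 0) → find? on the keys; reversed(blocks) → keys.reverse
def findFirstAndLastBlockRow_alt (blocks : List (Int × List (Int × List (String × Int)))) (colCandidate : Int) : Int × Int :=
  let keys := (PySem.Dict.ofList blocks).keys
  let firstBlockRow := (keys.find? (fun row => decide (pvBg blocks colCandidate row = some 0))).getD 0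
  let lastBlockRow := (keys.reverse.find? (fun row => decide (pvBg blocks colCandidate row = some 0))).getD 0
  (firstBlockRow, lastBlockRow)

-- ===== PRECONDITION & SPEC =====
-- Pre_ excludes exactly the inputs where blocks[row][colCandidate]["background"] raises KeyError in Python A.
def Pre_findFirstAndLastBlockRow (blocks : List (Int × List (Int × List (String × Int)))) (colCandidate : Int) : Prop :=
  ∀ row ∈ (PySem.Dict.ofList blocks).keys, (pvBg blocks colCandidate row).isSome
instance (blocks : List (Int × List (Int × List (String × Int)))) (colCandidate : Int) : Decidable (Pre_findFirstAndLastBlockRow blocks colCandidate) := by unfold Pre_findFirstAndLastBlockRow; infer_instance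
def pvWitness_findFirstAndLastBlockRow : (List (Int × List (Int × List (String × Int)))) × Int :=
  ([(0, [(0, [("background", 0)])]), (2, [(0, [("background", 1)])]), (5, [(0, [("background", 0)])])], 0)

def Spec_findFirstAndLastBlockRow (blocks : List (Int × List (Int × List (String × Int)))) (colCandidate : Int) (out : Int × Int) : Prop := out = findFirstAndLastBlockRow_alt blocks colCandidate
instance (blocks : List (Int × List (Int × List (String × Int)))) (colCandidate : Int) (out : Int × Int) : Decidable (Spec_findFirstAndLastBlockRow blocks colCandidate out) := by unfold Spec_findFirstAndLastBlockRow; infer_instance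

-- ===== CLAIM (what is proved, stated in full; the proofs are below) =====
def Claim_equal_findFirstAndLastBlockRow : Prop := ∀ (blocks : List (Int × List (Int × List (String × Int)))) (colCandidate : Int), Dom_findFirstAndLastBlockRow blocks colCandidate → Pre_findFirstAndLastBlockRow blocks colCandidate → Spec_findFirstAndLastBlockRow blocks colCandidate (findFirstAndLastBlockRow blocks colCandidate)

-- ===== LEMMAS AND PROOFS =====

-- A's flagged pass over any list equals the ends of the filtered list.
theorem flagLoop {α : Type} (p : α → Prop) [DecidablePred p] (l : List α) (st : Bool × α × α) :
    l.foldl (fun st row => if p row then (true, (if st.1 then st.2.1 else row), row) else st) st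
      = (match l.filter (fun row => decide (p row)) with
         | [] => st
         | r :: rs => (true, (if st.1 then st.2.1 else r), rs.getLast?.getD r)) := by
  induction l generalizing st with
  | nil => simp
  | cons x xs ih =>
    by_cases h : p x
    · simp only [List.foldl_cons, List.filter_cons, h, decide_true, if_pos]
      rw [ih]
      cases hf : xs.filter (fun row => decide (p row)) with
      | nil => simp
      | cons r rs =>
        simp only [if_true]
        cases rs with
        | nil => simp
        | cons y ys =>
          cases hl : (y :: ys).getLast? with
          | none => simp [List.getLast?_eq_none_iff] at hl
          | some z => simp [hl]
    · simp only [List.foldl_cons, if_neg h, List.filter_cons]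
      rw [ih]
      simp [h]

-- a forward find? is the head of the filtered list
theorem find?_eq_head_filter {α : Type} (p : α → Bool) (l : List α) :
    l.find? p = (l.filter p).head? := by
  induction l with
  | nil => rfl
  | cons x xs ih =>
    by_cases h : p x = true
    · rw [List.find?_cons_of_pos h, List.filter_cons_of_pos h, List.head?_cons]
    · rw [List.find?_cons_of_neg h, List.filter_cons_of_neg h, ih]

-- a backward find? is the last of the filtered list
theorem find?_reverse_eq_getLast_filter {α : Type} (p : α → Bool) (l : List α) :
    l.reverse.find? p = (l.filter p).getLast? := by
  rw [find?_eq_head_filter, List.filter_reverse, List.head?_reverse]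

-- ===== VERDICT (by name: the statement is the Claim_ definition above) =====
theorem findFirstAndLastBlockRow_spec : Claim_equal_findFirstAndLastBlockRow := by
  intro blocks colCandidate _ _
  unfold Spec_findFirstAndLastBlockRow findFirstAndLastBlockRow findFirstAndLastBlockRow_alt
  simp only [flagLoop]
  rw [find?_reverse_eq_getLast_filter, find?_eq_head_filter]
  cases hf : (PySem.Dict.ofList blocks).keys.filter
      (fun row => decide (pvBg blocks colCandidate row = some 0)) with
  | nil => simp
  | cons r rs =>
    cases rs with
    | nil => simp
    | cons y ys =>
      cases hl : (y :: ys).getLast? with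
      | none => simp [List.getLast?_eq_none_iff] at hl
      | some z => simp [List.getLast?_cons_cons, hl]
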